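-- pv_equiv track=rewrite | github.com/Protonk/sandbox-boostrap | book/graph/mappings/system_profiles/generate_attestations.py | anchor_hits
-- ===== SOURCE A (Python) =====
-- from typing import Any, Dict, List, Optional, Set
--
-- def anchor_hits(strings: List[str], anchor_map: Dict[str, Any]) -> List[Dict[str, Any]]:
--     hits: List[Dict[str, Any]] = []
--     literals = strings
--     for anchor, meta in anchor_map.items():
--         if anchor == "metadata":
--             continue
--         if any(anchor in lit for lit in literals):
--             hits.append(
--                 {
--                     "anchor": anchor,
--                     "filter_id": meta.get("filter_id"),
--                     "filter_name": meta.get("filter_name"),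
--                     "status": meta.get("status"),
--                 }
--             )
--     return hits
-- ===== SOURCE B (Python) =====
-- def anchor_hits(strings, anchor_map):
--     # One sweep over the strings with a shrinking worklist: each anchor is
--     # tested only until it first matches; the sweep stops once every anchor
--     # has matched.  Hits are then emitted in one pass over the anchor list.
--     items = [(a, m) for a, m in anchor_map.items() if a != "metadata"]
--     pending = list(dict.fromkeys(a for a, _ in items))
--     matched = set()
--     for lit in strings:
--         if not pending:
--             break
--         still = []
--         for a in pending:
--             if a in lit:
--                 matched.add(a)
--             else:
--                 still.append(a)
--         pending = still
--     return [
--         {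
--             "anchor": a,
--             "filter_id": m.get("filter_id"),
--             "filter_name": m.get("filter_name"),
--             "status": m.get("status"),
--         }
--         for a, m in items
--         if a in matched
--     ]
-- ===== Notes on version B (the rewrite author's own statement) =====
-- stated objective: alternative
-- what changed: B replaces A's per-anchor any()-scan over all strings by a single sweep over the strings with a shrinking worklist of still-unmatched anchors (each anchor is tested only until its first match, the sweep stops when the worklist empties), then emits the hit records in one pass over the anchor list.
import Mathlib
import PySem

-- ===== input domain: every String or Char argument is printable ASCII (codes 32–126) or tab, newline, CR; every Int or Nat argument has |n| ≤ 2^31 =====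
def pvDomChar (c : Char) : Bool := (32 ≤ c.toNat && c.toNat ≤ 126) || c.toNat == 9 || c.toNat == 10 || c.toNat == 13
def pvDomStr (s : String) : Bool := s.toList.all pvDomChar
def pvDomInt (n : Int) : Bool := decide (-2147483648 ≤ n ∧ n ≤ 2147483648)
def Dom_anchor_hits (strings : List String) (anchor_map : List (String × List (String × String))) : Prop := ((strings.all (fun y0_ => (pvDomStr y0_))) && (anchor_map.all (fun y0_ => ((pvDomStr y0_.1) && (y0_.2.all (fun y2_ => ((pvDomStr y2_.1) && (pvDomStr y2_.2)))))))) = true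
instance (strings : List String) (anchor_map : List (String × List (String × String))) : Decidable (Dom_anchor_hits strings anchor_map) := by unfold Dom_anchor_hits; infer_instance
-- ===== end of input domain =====

-- B inverts the loop nesting (one sweep over the strings builds a matched-anchor set,
-- then one pass over the anchors emits the hits) instead of A's per-anchor any()-scan; objective: alternative.

-- the hit record {"anchor": …, "filter_id": …, "filter_name": …, "status": …} built by both programs
def pvRecord (p : String × List (String × String)) : List (String × Option String) :=
  [("anchor", some p.1),
   ("filter_id", PySem.Dict.get? (PySem.Dict.mk p.2) "filter_id"),
   ("filter_name", PySem.Dict.get? (PySem.Dict.mk p.2) "filter_name"),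
   ("status", PySem.Dict.get? (PySem.Dict.mk p.2) "status")]

-- ===== PORT A =====
def anchor_hits (strings : List String) (anchor_map : List (String × List (String × String))) : List (List (String × Option String)) :=
  anchor_map.foldl (fun hits p =>
    if p.1 == "metadata" then hits
    else if strings.any (fun lit => PySem.Str.isIn p.1 lit) then hits ++ [pvRecord p]
    else hits) []

-- ===== PORT B =====
-- the sweep over the strings: per string, split the pending worklist into
-- newly matched anchors and the rest; stop early when nothing is pending
def pvSweep : List String → List String → PySem.Set String → PySem.Set String
  | [], _, matched => matched
  | lit :: rest, pending, matched =>
    if pending.isEmpty then matched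
    else
      let step := pending.foldl (fun (st : PySem.Set String × List String) a =>
        if PySem.Str.isIn a lit then (PySem.Set.add st.1 a, st.2)
        else (st.1, st.2 ++ [a])) (matched, [])
      pvSweep rest step.2 step.1

def anchor_hits_alt (strings : List String) (anchor_map : List (String × List (String × String))) : List (List (String × Option String)) :=
  let items := anchor_map.filter (fun p => p.1 != "metadata")
  let matched := pvSweep strings (PySem.List.dedup (items.map (fun p => p.1))) PySem.Set.empty
  (items.filter (fun p => PySem.Set.contains matched p.1)).map pvRecord

-- ===== PRECONDITION & SPEC =====
def Spec_anchor_hits (strings : List String) (anchor_map : List (String × List (String × String))) (out : List (List (String × Option String))) : Prop := out = anchor_hits_alt strings anchor_map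
instance (strings : List String) (anchor_map : List (String × List (String × String))) (out : List (List (String × Option String))) : Decidable (Spec_anchor_hits strings anchor_map out) := by unfold Spec_anchor_hits; infer_instance

-- ===== CLAIM (what is proved, stated in full; the proofs are below) =====
def Claim_equal_anchor_hits : Prop := ∀ (strings : List String) (anchor_map : List (String × List (String × String))), Dom_anchor_hits strings anchor_map → Spec_anchor_hits strings anchor_map (anchor_hits strings anchor_map)

-- ===== LEMMAS AND PROOFS =====

-- the per-string step: second component collects the anchors that did not match
theorem pv_step_snd (pending : List String) (lit : String)
    (m : PySem.Set String) (acc : List String) :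
    (pending.foldl (fun (st : PySem.Set String × List String) a =>
        if PySem.Str.isIn a lit then (PySem.Set.add st.1 a, st.2)
        else (st.1, st.2 ++ [a])) (m, acc)).2
      = acc ++ pending.filter (fun a => !PySem.Str.isIn a lit) := by
  induction pending generalizing m acc with
  | nil => simp
  | cons a rest ih =>
    simp only [List.foldl_cons, List.filter_cons]
    cases hi : PySem.Str.isIn a lit with
    | true => rw [if_pos rfl, ih]; simp
    | false =>
      rw [if_neg (by exact fun h => Bool.false_ne_true (hi ▸ h)), ih]
      simp

-- the per-string step: first component is the old set plus the matching anchors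
theorem pv_step_fst (pending : List String) (lit : String)
    (m : PySem.Set String) (acc : List String) (x : String) :
    x ∈ (pending.foldl (fun (st : PySem.Set String × List String) a =>
        if PySem.Str.isIn a lit then (PySem.Set.add st.1 a, st.2)
        else (st.1, st.2 ++ [a])) (m, acc)).1
      ↔ x ∈ m ∨ (x ∈ pending ∧ PySem.Str.isIn x lit) := by
  induction pending generalizing m acc with
  | nil => simp
  | cons a rest ih =>
    simp only [List.foldl_cons, List.mem_cons]
    cases hi : PySem.Str.isIn a lit with
    | true =>
      rw [if_pos rfl, ih]
      simp only [PySem.Set.mem_add]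
      constructor
      · rintro ((h | h) | ⟨h1, h2⟩)
        · exact Or.inl h
        · exact Or.inr ⟨Or.inl h, h ▸ hi⟩
        · exact Or.inr ⟨Or.inr h1, h2⟩
      · rintro (h | ⟨(rfl | h1), h2⟩)
        · exact Or.inl (Or.inl h)
        · exact Or.inl (Or.inr rfl)
        · exact Or.inr ⟨h1, h2⟩
    | false =>
      rw [if_neg (by exact fun h => Bool.false_ne_true (hi ▸ h)), ih]
      constructor
      · rintro (h | ⟨h1, h2⟩)
        · exact Or.inl h
        · exact Or.inr ⟨Or.inr h1, h2⟩
      · rintro (h | ⟨(rfl | h1), h2⟩)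
        · exact Or.inl h
        · exact absurd h2 (by rw [hi]; exact Bool.false_ne_true)
        · exact Or.inr ⟨h1, h2⟩

-- the sweep collects exactly the pending anchors occurring in some string
theorem pv_mem_sweep (strings : List String) (pending : List String)
    (matched : PySem.Set String) (x : String) :
    x ∈ pvSweep strings pending matched ↔
      x ∈ matched ∨ (x ∈ pending ∧ ∃ lit ∈ strings, PySem.Str.isIn x lit) := by
  induction strings generalizing pending matched with
  | nil => simp [pvSweep]
  | cons lit rest ih =>
    rw [pvSweep]
    cases hp : pending.isEmpty with
    | true =>
      rw [if_pos rfl]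
      rw [List.isEmpty_iff] at hp
      subst hp
      simp
    | false =>
      rw [if_neg (by exact fun h => Bool.false_ne_true (hp ▸ h))]
      simp only
      rw [ih, pv_step_fst, pv_step_snd, List.nil_append]
      simp only [List.mem_cons]
      constructor
      · rintro ((h | ⟨h1, h2⟩) | ⟨h1, l, hl, h2⟩)
        · exact Or.inl h
        · exact Or.inr ⟨h1, lit, Or.inl rfl, h2⟩
        · exact Or.inr ⟨(List.mem_filter.mp h1).1, l, Or.inr hl, h2⟩
      · rintro (h | ⟨h1, l, (rfl | hl), h2⟩)
        · exact Or.inl (Or.inl h)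
        · exact Or.inl (Or.inr ⟨h1, h2⟩)
        · cases hi : PySem.Str.isIn x lit with
          | true => exact Or.inl (Or.inr ⟨h1, rfl⟩)
          | false =>
            refine Or.inr ⟨List.mem_filter.mpr ⟨h1, by simpa using hi⟩, l, hl, h2⟩

theorem pv_contains_matched (strings : List String)
    (items : List (String × List (String × String))) (p : String × List (String × String))
    (hp : p ∈ items) :
    PySem.Set.contains
        (pvSweep strings (PySem.List.dedup (items.map (fun q => q.1))) PySem.Set.empty) p.1
      = strings.any (fun lit => PySem.Str.isIn p.1 lit) := by
  rw [Bool.eq_iff_iff, PySem.Set.contains_iff, List.any_eq_true, pv_mem_sweep]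
  constructor
  · rintro (h | ⟨_, l, hl, h2⟩)
    · simp [PySem.Set.empty] at h
    · exact ⟨l, hl, h2⟩
  · rintro ⟨l, hl, h2⟩
    exact Or.inr ⟨(PySem.List.mem_dedup _ _).mpr (List.mem_map.mpr ⟨p, hp, rfl⟩), l, hl, h2⟩

theorem pv_fold_eq (strings : List String) (anchor_map : List (String × List (String × String))) :
    anchor_map.foldl (fun hits p =>
      if p.1 == "metadata" then hits
      else if strings.any (fun lit => PySem.Str.isIn p.1 lit) then hits ++ [pvRecord p]
      else hits) []
    = (anchor_map.filter (fun p =>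
        (p.1 != "metadata") && strings.any (fun lit => PySem.Str.isIn p.1 lit))).map pvRecord := by
  have h := PySem.List.foldl_append_if
    (l := anchor_map)
    (p := fun p => (p.1 != "metadata") && strings.any (fun lit => PySem.Str.isIn p.1 lit))
    (f := pvRecord) (acc := [])
  rw [List.nil_append] at h
  rw [← h]
  apply PySem.List.foldl_congr_mem
  intro acc p _
  by_cases hm : p.1 = "metadata"
  · simp [hm]
  · simp [hm]

-- ===== VERDICT (by name: the statement is the Claim_ definition above) =====
theorem anchor_hits_spec : Claim_equal_anchor_hits := by
  intro strings anchor_map _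
  unfold Spec_anchor_hits anchor_hits anchor_hits_alt
  rw [pv_fold_eq]
  simp only
  rw [List.filter_filter]
  congr 1
  apply List.filter_congr
  intro p hp
  by_cases hm : p.1 = "metadata"
  · simp [hm]
  · have hne : (p.1 != "metadata") = true := by simp [hm]
    have hmem : p ∈ anchor_map.filter (fun p => p.1 != "metadata") :=
      List.mem_filter.mpr ⟨hp, hne⟩
    rw [pv_contains_matched strings _ p hmem, hne]
    simp
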